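-- pv_equiv track=rewrite | github.com/FxMx006/Advent-of-Code-2023 | Day1/PartTwo.py | get_digit
-- ===== SOURCE A (Python) =====
-- def get_digit(s):
--     digit_words = {
--         "zero": "0",
--         "one": "1",
--         "two": "2",
--         "three": "3",
--         "four": "4",
--         "five": "5",
--         "six": "6",
--         "seven": "7",
--         "eight": "8",
--         "nine": "9",
--     }
--     for word, digit in digit_words.items():
--         if s.endswith(word):
--             return digit
--     return None
-- ===== SOURCE B (Python) =====
-- _WORDS_BY_LEN = {
--     3: {"one": "1", "two": "2", "six": "6"},
--     4: {"zero": "0", "four": "4", "five": "5", "nine": "9"},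
--     5: {"three": "3", "seven": "7", "eight": "8"},
-- }
--
--
-- def get_digit(s):
--     # No digit-word is a suffix of another, so at most one suffix length can
--     # match and the scan order over lengths does not affect the result.
--     for k, table in _WORDS_BY_LEN.items():
--         d = table.get(s[-k:])
--         if d is not None:
--             return d
--     return None
-- ===== Notes on version B (the rewrite author's own statement) =====
-- stated objective: alternative
-- what changed: Replaces the linear scan of all ten digit-words with endswith by a dict of digit-words grouped by length: for each of the three word lengths the fixed-length suffix of s is taken once and looked up by key, exploiting that no digit-word is a suffix of another.
import Mathlib
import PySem

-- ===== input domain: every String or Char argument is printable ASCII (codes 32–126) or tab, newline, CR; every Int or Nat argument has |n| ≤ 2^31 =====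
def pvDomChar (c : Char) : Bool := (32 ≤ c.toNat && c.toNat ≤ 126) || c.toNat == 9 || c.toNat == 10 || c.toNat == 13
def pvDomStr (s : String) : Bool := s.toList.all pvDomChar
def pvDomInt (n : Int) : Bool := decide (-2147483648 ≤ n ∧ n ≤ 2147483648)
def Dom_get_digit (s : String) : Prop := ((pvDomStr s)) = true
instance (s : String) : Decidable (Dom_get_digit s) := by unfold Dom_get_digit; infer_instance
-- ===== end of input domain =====

-- B replaces the endswith scan over all ten digit-words by a dict grouped by word length,
-- looked up with the three fixed-length suffixes of s (an alternative of similar cost).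


-- ===== PORT A =====
-- the dict literal digit_words, in insertion order
def pvDigitWords : PySem.Dict String String :=
  PySem.Dict.ofList [("zero", "0"), ("one", "1"), ("two", "2"), ("three", "3"),
    ("four", "4"), ("five", "5"), ("six", "6"), ("seven", "7"), ("eight", "8"), ("nine", "9")]

-- the loop 'for word, digit in digit_words.items(): if s.endswith(word): return digit'
def pvALoop (s : String) : List (String × String) → Option String
  | [] => none
  | (word, digit) :: rest =>
    if PySem.Str.endswith s word then some digit else pvALoop s rest

def get_digit (s : String) : Option String :=
  pvALoop s (PySem.Dict.items pvDigitWords)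

-- ===== PORT B =====
-- the module-level dict _WORDS_BY_LEN of Source B
def pvWordsByLen : PySem.Dict Int (PySem.Dict String String) :=
  PySem.Dict.ofList
    [(3, PySem.Dict.ofList [("one", "1"), ("two", "2"), ("six", "6")]),
     (4, PySem.Dict.ofList [("zero", "0"), ("four", "4"), ("five", "5"), ("nine", "9")]),
     (5, PySem.Dict.ofList [("three", "3"), ("seven", "7"), ("eight", "8")])]

-- the loop 'for k, table in _WORDS_BY_LEN.items(): d = table.get(s[-k:]); if d is not None: return d'
def pvBLoop (s : String) : List (Int × PySem.Dict String String) → Option String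
  | [] => none
  | (k, table) :: rest =>
    match PySem.Dict.get? table (PySem.Str.slice s (some (-k)) none) with
    | some d => some d
    | none => pvBLoop s rest

def get_digit_alt (s : String) : Option String :=
  pvBLoop s (PySem.Dict.items pvWordsByLen)

-- ===== PRECONDITION & SPEC =====
def Spec_get_digit (s : String) (out : Option String) : Prop := out = get_digit_alt s
instance (s : String) (out : Option String) : Decidable (Spec_get_digit s out) := by unfold Spec_get_digit; infer_instance

-- ===== CLAIM (what is proved, stated in full; the proofs are below) =====
def Claim_equal_get_digit : Prop := ∀ (s : String), Dom_get_digit s → Spec_get_digit s (get_digit s)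

-- ===== LEMMAS AND PROOFS =====

-- s.endswith(w) is "w is a suffix of s"
theorem pv_endswith_eq (s w : String) :
    PySem.Str.endswith s w = decide (w.toList <:+ s.toList) := by
  rw [Bool.eq_iff_iff]
  simp only [decide_eq_true_eq]
  rw [show PySem.Str.endswith s w = PySem.Chars.endswith s.toList w.toList from
    PySem.Str.endswith_eq s w]
  exact PySem.Chars.endswith_iff _ _

-- a key comparison made by table.get(s[-k:]): for a word of length exactly k it is
-- "w is a suffix of s" (shorter suffixes of s cannot equal a length-k word)
theorem pv_key_cmp (s w : String) (kk : Int) (k : Nat) (hkk : kk = -(k : Int))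
    (hk : 1 < k) (hw : w.toList.length = k) :
    (w == PySem.Str.slice s (some kk) none) = decide (w.toList <:+ s.toList) := by
  subst hkk
  have hslice : (PySem.Str.slice s (some (-(k : Int))) none).toList
      = s.toList.drop (s.toList.length - k) := by
    rw [PySem.Str.toList_slice]
    simp only [PySem.Chars.slice_eq_listSlice]
    exact PySem.List.slice_from_neg_natCast s.toList k (by omega)
  rw [Bool.eq_iff_iff]
  simp only [beq_iff_eq, decide_eq_true_eq]
  constructor
  · intro h
    have : w.toList = s.toList.drop (s.toList.length - k) := by rw [h, hslice]
    rw [this]; exact List.drop_suffix _ _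
  · intro h
    apply String.ext
    show w.toList = _
    rw [hslice, ← hw]
    exact List.suffix_iff_eq_drop.mp h

-- two distinct digit-words can never both be suffixes of the same string
theorem pv_not_suffix {l w w' : List Char} (h : w <:+ l)
    (h1 : ¬ w <:+ w') (h2 : ¬ w' <:+ w) : ¬ w' <:+ l :=
  fun h' => (List.suffix_or_suffix_of_suffix h h').elim h1 h2

-- ===== VERDICT (by name: the statement is the Claim_ definition above) =====
theorem get_digit_spec : Claim_equal_get_digit := by
  intro s _
  show get_digit s = get_digit_alt s
  have hA : PySem.Dict.items pvDigitWords = [("zero", "0"), ("one", "1"), ("two", "2"),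
    ("three", "3"), ("four", "4"), ("five", "5"), ("six", "6"), ("seven", "7"),
    ("eight", "8"), ("nine", "9")] := by rfl
  have hB : PySem.Dict.items pvWordsByLen =
    [(3, PySem.Dict.mk [("one", "1"), ("two", "2"), ("six", "6")]),
     (4, PySem.Dict.mk [("zero", "0"), ("four", "4"), ("five", "5"), ("nine", "9")]),
     (5, PySem.Dict.mk [("three", "3"), ("seven", "7"), ("eight", "8")])] := by rfl
  unfold get_digit get_digit_alt
  rw [hA, hB]
  simp only [pvALoop, pvBLoop, PySem.Dict.get?_mk_cons, pv_endswith_eq,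
    pv_key_cmp s "zero" (-4) 4 (by norm_num) (by omega) (by decide),
    pv_key_cmp s "one" (-3) 3 (by norm_num) (by omega) (by decide),
    pv_key_cmp s "two" (-3) 3 (by norm_num) (by omega) (by decide),
    pv_key_cmp s "three" (-5) 5 (by norm_num) (by omega) (by decide),
    pv_key_cmp s "four" (-4) 4 (by norm_num) (by omega) (by decide),
    pv_key_cmp s "five" (-4) 4 (by norm_num) (by omega) (by decide),
    pv_key_cmp s "six" (-3) 3 (by norm_num) (by omega) (by decide),
    pv_key_cmp s "seven" (-5) 5 (by norm_num) (by omega) (by decide),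
    pv_key_cmp s "eight" (-5) 5 (by norm_num) (by omega) (by decide),
    pv_key_cmp s "nine" (-4) 4 (by norm_num) (by omega) (by decide)]
  by_cases h0 : ['z','e','r','o'] <:+ s.toList
  · have n1 := pv_not_suffix h0 (w' := ['o','n','e']) (by decide) (by decide)
    have n2 := pv_not_suffix h0 (w' := ['t','w','o']) (by decide) (by decide)
    have n6 := pv_not_suffix h0 (w' := ['s','i','x']) (by decide) (by decide)
    simp [h0, n1, n2, n6, PySem.Dict.get?]
  by_cases h1 : ['o','n','e'] <:+ s.toList
  · simp [h0, h1]
  by_cases h2 : ['t','w','o'] <:+ s.toList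
  · simp [h0, h1, h2]
  by_cases h3 : ['t','h','r','e','e'] <:+ s.toList
  · have n4 := pv_not_suffix h3 (w' := ['f','o','u','r']) (by decide) (by decide)
    have n5 := pv_not_suffix h3 (w' := ['f','i','v','e']) (by decide) (by decide)
    have n6 := pv_not_suffix h3 (w' := ['s','i','x']) (by decide) (by decide)
    have n9 := pv_not_suffix h3 (w' := ['n','i','n','e']) (by decide) (by decide)
    simp [h0, h1, h2, h3, n4, n5, n6, n9, PySem.Dict.get?]
  by_cases h4 : ['f','o','u','r'] <:+ s.toList
  · have n6 := pv_not_suffix h4 (w' := ['s','i','x']) (by decide) (by decide)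
    simp [h0, h1, h2, h3, h4, n6, PySem.Dict.get?]
  by_cases h5 : ['f','i','v','e'] <:+ s.toList
  · have n6 := pv_not_suffix h5 (w' := ['s','i','x']) (by decide) (by decide)
    simp [h0, h1, h2, h3, h4, h5, n6, PySem.Dict.get?]
  by_cases h6 : ['s','i','x'] <:+ s.toList
  · simp [h0, h1, h2, h3, h4, h5, h6]
  by_cases h7 : ['s','e','v','e','n'] <:+ s.toList
  · have n9 := pv_not_suffix h7 (w' := ['n','i','n','e']) (by decide) (by decide)
    simp [h0, h1, h2, h3, h4, h5, h6, h7, n9, PySem.Dict.get?]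
  by_cases h8 : ['e','i','g','h','t'] <:+ s.toList
  · have n9 := pv_not_suffix h8 (w' := ['n','i','n','e']) (by decide) (by decide)
    simp [h0, h1, h2, h3, h4, h5, h6, h7, h8, n9, PySem.Dict.get?]
  by_cases h9 : ['n','i','n','e'] <:+ s.toList
  · simp [h0, h1, h2, h3, h4, h5, h6, h7, h8, h9, PySem.Dict.get?]
  · simp [h0, h1, h2, h3, h4, h5, h6, h7, h8, h9, PySem.Dict.get?]
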